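-- pv_equiv track=rewrite | github.com/mojesty/mrc-for-flat-nested-ner | al2_implementation/ner_as_qa_f1_measure.py | get_spans_from_arrays
-- ===== SOURCE A (Python) =====
-- from typing import Dict, List, Optional, Set, Callable, Tuple
--
-- def get_spans_from_arrays(starts: List[int], ends: List[int]) -> List[Tuple[int, int]]:
--     spans: List[Tuple[int, int]] = []
--     start_idx = 0
--     inside = False
--     for i in range(len(starts)):
--         if starts[i]:
--             inside = True
--             start_idx = i
--             # we ignore double starts without corresponding ends therefore
--         if ends[i] and inside:
--             spans.append((start_idx, i))
--             inside = False
--     return spans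
-- ===== SOURCE B (Python) =====
-- from typing import List, Tuple
--
--
-- def get_spans_from_arrays(starts: List[int], ends: List[int]) -> List[Tuple[int, int]]:
--     n = len(starts)
--     start_positions = [i for i in range(n) if starts[i]]
--     end_positions = [i for i in range(n) if ends[i]]
--     spans: List[Tuple[int, int]] = []
--     j = 0
--     p = None          # latest start position consumed so far
--     last = -1         # end index of the last emitted span
--     for e in end_positions:
--         while j < len(start_positions) and start_positions[j] <= e:
--             p = start_positions[j]
--             j += 1
--         if p is not None and p > last:
--             spans.append((p, e))
--             last = e
--     return spans
-- ===== Notes on version B (the rewrite author's own statement) =====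
-- stated objective: alternative
-- what changed: A carries an inside flag and a running start_idx through one stateful pass; B first collects the start and end marker positions and then pairs them with a two-pointer merge (latest start at or before each end, strictly after the last emitted end).
import Mathlib
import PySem

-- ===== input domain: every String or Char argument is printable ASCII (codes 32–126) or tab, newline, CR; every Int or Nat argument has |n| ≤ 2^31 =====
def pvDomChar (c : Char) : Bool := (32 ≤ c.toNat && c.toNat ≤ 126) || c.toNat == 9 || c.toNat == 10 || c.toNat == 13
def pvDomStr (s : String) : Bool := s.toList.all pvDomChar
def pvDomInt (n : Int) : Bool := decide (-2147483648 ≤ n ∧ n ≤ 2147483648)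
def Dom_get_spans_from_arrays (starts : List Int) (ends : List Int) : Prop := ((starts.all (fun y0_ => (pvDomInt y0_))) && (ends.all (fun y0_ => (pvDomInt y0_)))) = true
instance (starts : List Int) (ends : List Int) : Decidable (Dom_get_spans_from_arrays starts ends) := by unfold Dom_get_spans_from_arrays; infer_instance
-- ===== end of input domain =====

-- B replaces A's single stateful pass (inside flag, running start_idx) by precomputing the
-- start/end marker positions and pairing them with a two-pointer merge; objective: alternative
-- decomposition, same cost.

-- ===== PORT A =====
-- one pass over i in range(len(starts)); Python truthiness of an int is ≠ 0;
-- ends[i] is read unconditionally, so Pre_ below requires len(ends) ≥ len(starts)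
def get_spans_from_arrays (starts : List Int) (ends : List Int) : List (Int × Int) :=
  ((PySem.List.pyRange 0 starts.length 1).foldl
    (fun st i =>
      let st1 := if PySem.List.pyGetD starts i 0 ≠ 0 then (st.1, i, true) else st
      if PySem.List.pyGetD ends i 0 ≠ 0 ∧ st1.2.2 then
        (st1.1 ++ [(st1.2.1, i)], st1.2.1, false)
      else st1)
    ([], 0, false)).1

-- ===== PORT B =====
-- the while loop advancing the pointer j through start_positions, transliterated as
-- structural recursion on the not-yet-consumed suffix of start_positions
def pvAdvance (S : List Int) (e : Int) (p : Option Int) : List Int × Option Int :=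
  match S with
  | [] => ([], p)
  | s :: rest => if s ≤ e then pvAdvance rest e (some s) else (s :: rest, p)

def get_spans_from_arrays_alt (starts : List Int) (ends : List Int) : List (Int × Int) :=
  let n : Int := starts.length
  let start_positions := (PySem.List.pyRange 0 n 1).filter (fun i => PySem.List.pyGetD starts i 0 != 0)
  let end_positions := (PySem.List.pyRange 0 n 1).filter (fun i => PySem.List.pyGetD ends i 0 != 0)
  (end_positions.foldl
    (fun st e =>
      let ap := pvAdvance st.2.1 e st.2.2.1
      match ap.2 with
      | some q => if q > st.2.2.2 then (st.1 ++ [(q, e)], ap.1, some q, e)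
                  else (st.1, ap.1, some q, st.2.2.2)
      | none => (st.1, ap.1, none, st.2.2.2))
    ([], start_positions, none, -1)).1

-- ===== PRECONDITION & SPEC =====
-- A reads ends[i] for every i < len(starts), so it raises IndexError iff ends is shorter
-- than starts; exactly those inputs are excluded (B raises there too).
def Pre_get_spans_from_arrays (starts : List Int) (ends : List Int) : Prop :=
  starts.length ≤ ends.length
instance (starts : List Int) (ends : List Int) : Decidable (Pre_get_spans_from_arrays starts ends) := by unfold Pre_get_spans_from_arrays; infer_instance

def pvWitness_get_spans_from_arrays : List Int × List Int := ([1, 0, 1], [0, 1, 1])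

def Spec_get_spans_from_arrays (starts : List Int) (ends : List Int) (out : List (Int × Int)) : Prop := out = get_spans_from_arrays_alt starts ends
instance (starts : List Int) (ends : List Int) (out : List (Int × Int)) : Decidable (Spec_get_spans_from_arrays starts ends out) := by unfold Spec_get_spans_from_arrays; infer_instance

-- ===== CLAIM (what is proved, stated in full; the proofs are below) =====
def Claim_equal_get_spans_from_arrays : Prop := ∀ (starts : List Int) (ends : List Int), Dom_get_spans_from_arrays starts ends → Pre_get_spans_from_arrays starts ends → Spec_get_spans_from_arrays starts ends (get_spans_from_arrays starts ends)

-- ===== LEMMAS AND PROOFS =====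

-- generic versions of the two loop bodies, with the two truthiness tests abstracted into
-- Boolean predicates ps (starts[i] is truthy) and pe (ends[i] is truthy)
def pvGoA (ps pe : Int → Bool) (r : List Int) (st : List (Int × Int) × Int × Bool) :
    List (Int × Int) × Int × Bool :=
  r.foldl
    (fun st i =>
      let st1 := if ps i then (st.1, i, true) else st
      if pe i ∧ st1.2.2 then (st1.1 ++ [(st1.2.1, i)], st1.2.1, false) else st1)
    st

def pvGoB (E : List Int) (st : List (Int × Int) × List Int × Option Int × Int) :
    List (Int × Int) × List Int × Option Int × Int :=
  E.foldl
    (fun st e =>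
      let ap := pvAdvance st.2.1 e st.2.2.1
      match ap.2 with
      | some q => if q > st.2.2.2 then (st.1 ++ [(q, e)], ap.1, some q, e)
                  else (st.1, ap.1, some q, st.2.2.2)
      | none => (st.1, ap.1, none, st.2.2.2))
    st

lemma pvIsEmpty_concat (l : List Int) (i : Int) : (l ++ [i]).isEmpty = false := by
  cases l <;> rfl

lemma pvAdvance_consume (S1 S2 : List Int) (e : Int) (p : Option Int)
    (h : ∀ s ∈ S1, s ≤ e) :
    pvAdvance (S1 ++ S2) e p = pvAdvance S2 e (S1.getLast?.or p) := by
  induction S1 generalizing p with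
  | nil => simp
  | cons s rest ih =>
      have hs : s ≤ e := h s (by simp)
      simp only [List.cons_append, pvAdvance, if_pos hs]
      rw [ih (some s) (fun x hx => h x (List.mem_cons_of_mem _ hx))]
      cases rest with
      | nil => simp
      | cons a l =>
          obtain ⟨b, hb⟩ := Option.isSome_iff_exists.mp
            (List.getLast?_isSome.mpr (List.cons_ne_nil a l))
          simp [hb]

lemma pvAdvance_stop (S : List Int) (e : Int) (p : Option Int)
    (h : ∀ s ∈ S, e < s) : pvAdvance S e p = (S, p) := by
  cases S with
  | nil => rfl
  | cons s rest =>
      have : ¬ s ≤ e := by have := h s (by simp); omega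
      simp [pvAdvance, this]

-- the main invariant: A's running (spans, start_idx, inside) over the remaining indices r
-- matches B's (spans, unconsumed starts, latest consumed start, last emitted end)
lemma pvMain (ps pe : Int → Bool) (r : List Int) (hr : r.Pairwise (· < ·))
    (spans : List (Int × Int)) (pastS : List Int) (p : Option Int) (last : Int)
    (hpast : ∀ s ∈ pastS, last < s ∧ ∀ x ∈ r, s < x)
    (hp : ∀ q, p = some q → q ≤ last)
    (hlast : ∀ x ∈ r, last < x) :
    (pvGoA ps pe r (spans, (pastS.getLast?.or p).getD 0, !pastS.isEmpty)).1
      = (pvGoB (r.filter pe) (spans, pastS ++ r.filter ps, p, last)).1 := by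
  induction r generalizing spans pastS p last with
  | nil => simp [pvGoA, pvGoB]
  | cons i r' ih =>
      have hr' : r'.Pairwise (· < ·) := hr.tail
      have hir' : ∀ x ∈ r', i < x := fun x hx => (List.pairwise_cons.mp hr).1 x hx
      have hlasti : last < i := hlast i (by simp)
      have hlast' : ∀ x ∈ r', last < x := fun x hx => lt_trans hlasti (hir' x hx)
      by_cases hps : ps i = true
      all_goals by_cases hpe : pe i = true
      · -- start and end at i: both sides emit (i, i)
        have hadv : pvAdvance (pastS ++ i :: List.filter ps r') i p
            = (List.filter ps r', some i) := by
          rw [show pastS ++ i :: List.filter ps r' = (pastS ++ [i]) ++ List.filter ps r' by simp,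
            pvAdvance_consume _ _ _ _ (by
              intro s hs; rcases List.mem_append.mp hs with h1 | h1
              · exact le_of_lt ((hpast s h1).2 i (by simp))
              · simp at h1; omega),
            pvAdvance_stop _ _ _ (fun s hs => hir' s (List.mem_of_mem_filter hs))]
          simp
        have key := ih hr' (spans ++ [(i, i)]) [] (some i) i
          (by simp) (by intro q hq; cases hq; rfl) hir'
        simp only [pvGoA, pvGoB, List.filter_cons, hps, hpe, if_true, List.foldl_cons] at key ⊢
        simp only [hadv, gt_iff_lt, hlasti, if_pos, and_true]
        simpa [List.getLast?_concat, pvIsEmpty_concat, List.append_assoc] using key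
      · -- start at i, no end: i joins the pending starts
        have key := ih hr' spans (pastS ++ [i]) p last
          (by
            intro s hs; rcases List.mem_append.mp hs with h1 | h1
            · exact ⟨(hpast s h1).1, fun x hx => (hpast s h1).2 x (List.mem_cons_of_mem _ hx)⟩
            · simp at h1; subst h1; exact ⟨hlasti, hir'⟩)
          hp hlast'
        simp only [pvGoA, pvGoB, List.filter_cons, hps, hpe, if_true, List.foldl_cons,
          Bool.false_eq_true, if_false] at key ⊢
        simpa [List.getLast?_concat, pvIsEmpty_concat, List.append_assoc] using key
      · -- no start, an end at i: emit iff some pending start exists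
        have hadv : pvAdvance (pastS ++ List.filter ps r') i p
            = (List.filter ps r', pastS.getLast?.or p) := by
          rw [pvAdvance_consume _ _ _ _
              (fun s hs => le_of_lt ((hpast s hs).2 i (by simp))),
            pvAdvance_stop _ _ _ (fun s hs => hir' s (List.mem_of_mem_filter hs))]
        cases hpl : pastS.getLast? with
        | none =>
          have hpnil : pastS = [] := List.getLast?_eq_none_iff.mp hpl
          subst hpnil
          simp only [List.nil_append] at hadv
          cases hpc : p with
          | none =>
            subst hpc
            have key := ih hr' spans [] none last (by simp) (by intro q hq; cases hq) hlast'
            simp only [pvGoA, pvGoB, List.filter_cons, hps, hpe, if_true, List.foldl_cons,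
              Bool.false_eq_true, if_false] at key ⊢
            simpa [hadv] using key
          | some q =>
            subst hpc
            have hql : q ≤ last := hp q rfl
            have hnot : ¬ (last < q) := by omega
            have key := ih hr' spans [] (some q) last (by simp)
              (by intro q' hq'; cases hq'; exact hql) hlast'
            simp only [pvGoA, pvGoB, List.filter_cons, hps, hpe, if_true, List.foldl_cons,
              Bool.false_eq_true, if_false] at key ⊢
            simpa [hadv, hnot] using key
        | some q =>
          have hqmem : q ∈ pastS := List.mem_of_getLast? hpl
          have hql : last < q := (hpast q hqmem).1
          have hne : pastS.isEmpty = false := by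
            cases pastS with
            | nil => simp at hpl
            | cons a l => rfl
          have key := ih hr' (spans ++ [(q, i)]) [] (some q) i
            (by simp)
            (by intro q' hq'; cases hq'; exact le_of_lt ((hpast q hqmem).2 i (by simp)))
            hir'
          simp only [pvGoA, pvGoB, List.filter_cons, hps, hpe, if_true, List.foldl_cons,
            Bool.false_eq_true, if_false] at key ⊢
          simp only [hadv, hpl, hne, Option.or, gt_iff_lt, hql, if_pos, Bool.not_false,
            and_true, Option.getD_some]
          simpa [List.getLast?_concat, pvIsEmpty_concat, List.append_assoc] using key
      · -- neither start nor end at i: both sides skip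
        have key := ih hr' spans pastS p last
          (fun s hs => ⟨(hpast s hs).1, fun x hx => (hpast s hs).2 x (List.mem_cons_of_mem _ hx)⟩)
          hp hlast'
        simp only [pvGoA, pvGoB, List.filter_cons, hps, hpe, List.foldl_cons,
          Bool.false_eq_true, if_false] at key ⊢
        simpa [List.getLast?_concat, pvIsEmpty_concat, List.append_assoc] using key

-- the ports are the generic folds instantiated with the concrete truthiness tests
lemma portA_eq (starts ends : List Int) :
    get_spans_from_arrays starts ends
      = (pvGoA (fun i => PySem.List.pyGetD starts i 0 != 0)
               (fun i => PySem.List.pyGetD ends i 0 != 0)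
               (PySem.List.pyRange 0 starts.length 1) ([], 0, false)).1 := by
  unfold get_spans_from_arrays pvGoA
  congr 1
  apply List.foldl_ext
  intro st i
  by_cases h1 : PySem.List.pyGetD starts i 0 = 0 <;>
    by_cases h2 : PySem.List.pyGetD ends i 0 = 0 <;>
      simp [h1, h2]

lemma portB_eq (starts ends : List Int) :
    get_spans_from_arrays_alt starts ends
      = (pvGoB ((PySem.List.pyRange 0 (starts.length : Int) 1).filter
                  (fun i => PySem.List.pyGetD ends i 0 != 0))
               ([], (PySem.List.pyRange 0 (starts.length : Int) 1).filter
                  (fun i => PySem.List.pyGetD starts i 0 != 0), none, -1)).1 := rfl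

-- ===== VERDICT (by name: the statement is the Claim_ definition above) =====
theorem get_spans_from_arrays_spec : Claim_equal_get_spans_from_arrays := by
  intro starts ends _ _
  unfold Spec_get_spans_from_arrays
  rw [portA_eq, portB_eq]
  have := pvMain (fun i => PySem.List.pyGetD starts i 0 != 0)
    (fun i => PySem.List.pyGetD ends i 0 != 0)
    (PySem.List.pyRange 0 (starts.length : Int) 1)
    (PySem.List.pairwise_lt_pyRange_one _ _)
    [] [] none (-1)
    (by simp) (by intro q hq; cases hq)
    (by intro x hx; have := (PySem.List.mem_pyRange_one.mp hx).1; omega)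
  simpa using this
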